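-- pv_equiv track=rewrite | github.com/kouseidayo/PowerAnalyser | manager_project/manager/MyLib/main.py | number_to_japanese
-- ===== SOURCE A (Python) =====
-- import math
--
-- def number_to_japanese(num):
--     num_array = [int(digit) for digit in str(num)]
--     # 日本語の数字表記
--     japanese_big_units = ["", "万", "億", "兆"]
--
--     length = len(num_array)
--     kugiri = math.floor(length/4)+1
--     add_cnt = 0
--
--     for i in range(kugiri):
--         index = length+add_cnt - (i*4+add_cnt)
--         num_array.insert(index, japanese_big_units[i])
--         add_cnt += 1
--     return ''.join(map(str, num_array))
-- ===== SOURCE B (Python) =====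
-- def number_to_japanese(num):
--     s = str(num)
--     units = ["", "万", "億", "兆"]
--     n = len(s)
--     groups = n // 4
--     pieces = [s[:n - 4 * groups]]
--     for g in range(groups, 0, -1):
--         pieces.append(units[g] + s[n - 4 * g : n - 4 * g + 4])
--     return ''.join(pieces)
-- ===== Notes on version B (the rewrite author's own statement) =====
-- stated objective: simpler
-- what changed: B slices str(num) into the head remainder plus unit-prefixed four-digit groups and joins them, instead of A's loop of in-place inserts into a mutable digit list with add_cnt index bookkeeping; Pre_ excludes negative num (A raises ValueError on int of the minus sign) and num of sixteen or more decimal digits (A raises IndexError looking up a fifth big unit).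
import Mathlib
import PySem

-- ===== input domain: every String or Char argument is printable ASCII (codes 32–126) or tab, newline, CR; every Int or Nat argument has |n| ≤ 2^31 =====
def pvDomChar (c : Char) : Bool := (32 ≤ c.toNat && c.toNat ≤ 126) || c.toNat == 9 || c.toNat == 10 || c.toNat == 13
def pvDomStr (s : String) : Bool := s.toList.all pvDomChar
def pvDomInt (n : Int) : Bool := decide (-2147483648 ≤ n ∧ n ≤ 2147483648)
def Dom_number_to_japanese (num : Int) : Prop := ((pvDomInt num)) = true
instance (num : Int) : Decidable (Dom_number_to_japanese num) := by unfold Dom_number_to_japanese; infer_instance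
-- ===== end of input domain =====

-- B slices str(num) into a head remainder plus unit-prefixed four-digit groups and joins them,
-- instead of A's in-place inserts into a mutable digit list (objective: simpler decomposition).

-- ===== PORT A =====
-- num_array holds ints and then the inserted unit strings: encoded as Int ⊕ String.
-- int(digit) raises ValueError on '-', and an out-of-range big-unit index raises IndexError: both excluded by Pre_;
-- the .getD fallbacks only make the port total.
def number_to_japanese (num : Int) : String :=
  let numArray : List (Int ⊕ String) :=
    (PySem.Int.toChars num).map (fun c => Sum.inl ((PySem.Int.ofChars? [c]).getD 0))
  let units : List String := ["", "万", "億", "兆"]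
  let length : Int := numArray.length
  let kugiri : Int := PySem.Int.floordiv length 4 + 1
  let st := (PySem.List.pyRange 0 kugiri 1).foldl
    (fun (st : List (Int ⊕ String) × Int) (i : Int) =>
      let index := length + st.2 - (i * 4 + st.2)
      (PySem.List.insert st.1 index (Sum.inr ((PySem.List.pyGet? units i).getD "")), st.2 + 1))
    (numArray, 0)
  PySem.Str.join "" (st.1.map (fun x => match x with
    | Sum.inl n => PySem.Int.toStr n
    | Sum.inr s => s))

-- ===== PORT B =====
-- straight transliteration of Source B; units[g] is ported totally via .getD
-- (Python raises IndexError there only with sixteen or more digits, outside Pre_).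
def number_to_japanese_alt (num : Int) : String :=
  let s : List Char := PySem.Int.toChars num
  let units : List String := ["", "万", "億", "兆"]
  let n : Int := s.length
  let groups : Int := PySem.Int.floordiv n 4
  let pieces0 : List String := [String.ofList (PySem.List.slice s none (some (n - 4 * groups)))]
  let pieces : List String := (PySem.List.pyRange groups 0 (-1)).foldl
    (fun acc g =>
      acc ++ [((PySem.List.pyGet? units g).getD "") ++
              String.ofList (PySem.List.slice s (some (n - 4 * g)) (some (n - 4 * g + 4)))])
    pieces0
  PySem.Str.join "" pieces

-- ===== PRECONDITION & SPEC =====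
-- A raises ValueError on negative num (int of the minus sign) and IndexError once str(num) has sixteen
-- or more digits (a fifth big unit does not exist); Pre_ admits exactly the inputs where A returns.
def Pre_number_to_japanese (num : Int) : Prop := 0 ≤ num ∧ num < 10 ^ 15
instance (num : Int) : Decidable (Pre_number_to_japanese num) := by unfold Pre_number_to_japanese; infer_instance
def pvWitness_number_to_japanese : Int := 12345

def Spec_number_to_japanese (num : Int) (out : String) : Prop := out = number_to_japanese_alt num
instance (num : Int) (out : String) : Decidable (Spec_number_to_japanese num out) := by unfold Spec_number_to_japanese; infer_instance

-- ===== CLAIM (what is proved, stated in full; the proofs are below) =====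
def Claim_equal_number_to_japanese : Prop := ∀ (num : Int), Dom_number_to_japanese num → Pre_number_to_japanese num → Spec_number_to_japanese num (number_to_japanese num)

-- ===== LEMMAS AND PROOFS =====

theorem digit_cases (c : Char) (h : c.isDigit = true) :
    c = '0' ∨ c = '1' ∨ c = '2' ∨ c = '3' ∨ c = '4' ∨ c = '5' ∨ c = '6' ∨ c = '7' ∨ c = '8' ∨ c = '9' := by
  have hb1 : 48 ≤ c.toNat := by
    simp only [Char.isDigit, decide_eq_true_eq, Bool.and_eq_true, ge_iff_le, UInt32.le_iff_toNat_le] at h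
    exact h.1
  have hb2 : c.toNat ≤ 57 := by
    simp only [Char.isDigit, decide_eq_true_eq, Bool.and_eq_true, UInt32.le_iff_toNat_le] at h
    exact h.2
  have hc : Char.ofNat c.toNat = c := Char.ofNat_toNat c
  set n := c.toNat with hn
  interval_cases n <;> rw [← hc] <;> decide

-- str(int(c)) gives back the one-character string of a digit character c
theorem digitRound (c : Char) (h : c.isDigit = true) :
    PySem.Int.toStr ((PySem.Int.ofChars? [c]).getD 0) = String.ofList [c] := by
  rcases digit_cases c h with h|h|h|h|h|h|h|h|h|h <;> subst h <;> decide

theorem toDigitsCore_le (b : Nat) : ∀ (f n : Nat) (acc : List Char),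
    acc.length ≤ (Nat.toDigitsCore b f n acc).length := by
  intro f
  induction f with
  | zero => intro n acc; simp [Nat.toDigitsCore]
  | succ f ih =>
    intro n acc
    rw [Nat.toDigitsCore]
    split
    · simp
    · exact le_trans (by simp) (ih (n / b) _)

theorem toDigits_ne_nil (b n : Nat) : Nat.toDigits b n ≠ [] := by
  unfold Nat.toDigits
  rw [Nat.toDigitsCore]
  split
  · simp
  · intro hnil
    have := toDigitsCore_le b n (n / b) [Nat.digitChar (n % b)]
    rw [hnil] at this
    simp at this

theorem toDigitsCore_digits : ∀ (f n : Nat) (acc : List Char),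
    (∀ c ∈ acc, c.isDigit = true) → ∀ c ∈ Nat.toDigitsCore 10 f n acc, c.isDigit = true := by
  intro f
  induction f with
  | zero => intro n acc hacc; simpa [Nat.toDigitsCore] using hacc
  | succ f ih =>
    intro n acc hacc c hc
    have hd : (Nat.digitChar (n % 10)).isDigit = true := by
      have h10 : n % 10 < 10 := Nat.mod_lt _ (by omega)
      interval_cases h : n % 10 <;> rfl
    rw [Nat.toDigitsCore] at hc
    split at hc
    · rcases List.mem_cons.mp hc with hc | hc
      · simpa [hc] using hd
      · exact hacc c hc
    · refine ih (n / 10) _ ?_ c hc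
      intro d hd'
      rcases List.mem_cons.mp hd' with hd' | hd'
      · simpa [hd'] using hd
      · exact hacc d hd'

-- ===== VERDICT (by name: the statement is the Claim_ definition above) =====
theorem number_to_japanese_spec : Claim_equal_number_to_japanese := by
  intro num hdom hpre
  unfold Spec_number_to_japanese
  obtain ⟨h0, hub⟩ := hpre
  have hdomle : num ≤ 2147483648 := by
    unfold Dom_number_to_japanese pvDomInt at hdom
    simp only [decide_eq_true_eq] at hdom
    exact hdom.2
  have hts : PySem.Int.toChars num = Nat.toDigits 10 num.toNat := by
    simp [PySem.Int.toChars, not_lt.mpr h0]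
  have hdig : ∀ c ∈ PySem.Int.toChars num, c.isDigit = true := by
    rw [hts]
    exact toDigitsCore_digits _ _ _ (by simp)
  have hne : PySem.Int.toChars num ≠ [] := by rw [hts]; exact toDigits_ne_nil 10 _
  have hlen : (PySem.Int.toChars num).length ≤ 10 := by
    rw [hts]
    exact Nat.toDigits_length 10 num.toNat 10 (by norm_num) (by omega)
  rcases hcs : PySem.Int.toChars num with _ | ⟨c0, _ | ⟨c1, _ | ⟨c2, _ | ⟨c3, _ | ⟨c4, _ | ⟨c5, _ | ⟨c6, _ | ⟨c7, _ | ⟨c8, _ | ⟨c9, _ | ⟨cx, rest⟩⟩⟩⟩⟩⟩⟩⟩⟩⟩⟩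
  · exact absurd hcs hne
  · -- length 1
    rw [hcs] at hdig
    simp only [number_to_japanese, number_to_japanese_alt, hcs]
    norm_num
    rw [show PySem.List.pyRange (0:Int) 1 = [0] from by decide]
    first
    | simp only [List.foldl, List.map, List.cons_append, List.nil_append]
    | skip
    norm_num
    rw [PySem.List.insert_ofNat _ 1 _ (by simp)]
    first
    | simp only [List.take, List.drop, List.map, List.cons_append, List.nil_append]
    | skip
    rw [digitRound c0 (hdig c0 (by simp))]
    simp [PySem.List.slice, PySem.List.clampIdx, PySem.Str.join, PySem.Chars.join,
          List.intercalate, List.intersperse]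
  · -- length 2
    rw [hcs] at hdig
    simp only [number_to_japanese, number_to_japanese_alt, hcs]
    norm_num
    rw [show PySem.List.pyRange (0:Int) 1 = [0] from by decide]
    first
    | simp only [List.foldl, List.map, List.cons_append, List.nil_append]
    | skip
    norm_num
    rw [PySem.List.insert_ofNat _ 2 _ (by simp)]
    first
    | simp only [List.take, List.drop, List.map, List.cons_append, List.nil_append]
    | skip
    rw [digitRound c0 (hdig c0 (by simp)),
        digitRound c1 (hdig c1 (by simp))]
    simp [PySem.List.slice, PySem.List.clampIdx, PySem.Str.join, PySem.Chars.join,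
          List.intercalate, List.intersperse]
  · -- length 3
    rw [hcs] at hdig
    simp only [number_to_japanese, number_to_japanese_alt, hcs]
    norm_num
    rw [show PySem.List.pyRange (0:Int) 1 = [0] from by decide]
    first
    | simp only [List.foldl, List.map, List.cons_append, List.nil_append]
    | skip
    norm_num
    rw [PySem.List.insert_ofNat _ 3 _ (by simp)]
    first
    | simp only [List.take, List.drop, List.map, List.cons_append, List.nil_append]
    | skip
    rw [digitRound c0 (hdig c0 (by simp)),
        digitRound c1 (hdig c1 (by simp)),
        digitRound c2 (hdig c2 (by simp))]
    simp [PySem.List.slice, PySem.List.clampIdx, PySem.Str.join, PySem.Chars.join,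
          List.intercalate, List.intersperse]
  · -- length 4
    rw [hcs] at hdig
    simp only [number_to_japanese, number_to_japanese_alt, hcs]
    norm_num
    rw [show PySem.List.pyRange (0:Int) 2 = [0, 1] from by decide,
        show PySem.List.pyRange (1:Int) 0 (-1) = [1] from by decide]
    first
    | simp only [List.foldl, List.map, List.cons_append, List.nil_append]
    | skip
    norm_num
    rw [PySem.List.insert_ofNat _ 4 _ (by simp)]
    first
    | simp only [List.take, List.drop, List.map, List.cons_append, List.nil_append]
    | skip
    rw [PySem.List.insert_zero]
    first
    | simp only [List.take, List.drop, List.map, List.cons_append, List.nil_append]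
    | skip
    rw [digitRound c0 (hdig c0 (by simp)),
        digitRound c1 (hdig c1 (by simp)),
        digitRound c2 (hdig c2 (by simp)),
        digitRound c3 (hdig c3 (by simp))]
    simp [PySem.List.slice, PySem.List.clampIdx, PySem.Str.join, PySem.Chars.join,
          List.intercalate, List.intersperse]
  · -- length 5
    rw [hcs] at hdig
    simp only [number_to_japanese, number_to_japanese_alt, hcs]
    norm_num
    rw [show PySem.List.pyRange (0:Int) 2 = [0, 1] from by decide,
        show PySem.List.pyRange (1:Int) 0 (-1) = [1] from by decide]
    first
    | simp only [List.foldl, List.map, List.cons_append, List.nil_append]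
    | skip
    norm_num
    rw [PySem.List.insert_ofNat _ 5 _ (by simp)]
    first
    | simp only [List.take, List.drop, List.map, List.cons_append, List.nil_append]
    | skip
    rw [PySem.List.insert_ofNat _ 1 _ (by simp)]
    first
    | simp only [List.take, List.drop, List.map, List.cons_append, List.nil_append]
    | skip
    rw [digitRound c0 (hdig c0 (by simp)),
        digitRound c1 (hdig c1 (by simp)),
        digitRound c2 (hdig c2 (by simp)),
        digitRound c3 (hdig c3 (by simp)),
        digitRound c4 (hdig c4 (by simp))]
    simp [PySem.List.slice, PySem.List.clampIdx, PySem.Str.join, PySem.Chars.join,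
          List.intercalate, List.intersperse]
  · -- length 6
    rw [hcs] at hdig
    simp only [number_to_japanese, number_to_japanese_alt, hcs]
    norm_num
    rw [show PySem.List.pyRange (0:Int) 2 = [0, 1] from by decide,
        show PySem.List.pyRange (1:Int) 0 (-1) = [1] from by decide]
    first
    | simp only [List.foldl, List.map, List.cons_append, List.nil_append]
    | skip
    norm_num
    rw [PySem.List.insert_ofNat _ 6 _ (by simp)]
    first
    | simp only [List.take, List.drop, List.map, List.cons_append, List.nil_append]
    | skip
    rw [PySem.List.insert_ofNat _ 2 _ (by simp)]
    first
    | simp only [List.take, List.drop, List.map, List.cons_append, List.nil_append]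
    | skip
    rw [digitRound c0 (hdig c0 (by simp)),
        digitRound c1 (hdig c1 (by simp)),
        digitRound c2 (hdig c2 (by simp)),
        digitRound c3 (hdig c3 (by simp)),
        digitRound c4 (hdig c4 (by simp)),
        digitRound c5 (hdig c5 (by simp))]
    simp [PySem.List.slice, PySem.List.clampIdx, PySem.Str.join, PySem.Chars.join,
          List.intercalate, List.intersperse]
  · -- length 7
    rw [hcs] at hdig
    simp only [number_to_japanese, number_to_japanese_alt, hcs]
    norm_num
    rw [show PySem.List.pyRange (0:Int) 2 = [0, 1] from by decide,
        show PySem.List.pyRange (1:Int) 0 (-1) = [1] from by decide]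
    first
    | simp only [List.foldl, List.map, List.cons_append, List.nil_append]
    | skip
    norm_num
    rw [PySem.List.insert_ofNat _ 7 _ (by simp)]
    first
    | simp only [List.take, List.drop, List.map, List.cons_append, List.nil_append]
    | skip
    rw [PySem.List.insert_ofNat _ 3 _ (by simp)]
    first
    | simp only [List.take, List.drop, List.map, List.cons_append, List.nil_append]
    | skip
    rw [digitRound c0 (hdig c0 (by simp)),
        digitRound c1 (hdig c1 (by simp)),
        digitRound c2 (hdig c2 (by simp)),
        digitRound c3 (hdig c3 (by simp)),
        digitRound c4 (hdig c4 (by simp)),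
        digitRound c5 (hdig c5 (by simp)),
        digitRound c6 (hdig c6 (by simp))]
    simp [PySem.List.slice, PySem.List.clampIdx, PySem.Str.join, PySem.Chars.join,
          List.intercalate, List.intersperse]
  · -- length 8
    rw [hcs] at hdig
    simp only [number_to_japanese, number_to_japanese_alt, hcs]
    norm_num
    rw [show PySem.List.pyRange (0:Int) 3 = [0, 1, 2] from by decide,
        show PySem.List.pyRange (2:Int) 0 (-1) = [2, 1] from by decide]
    first
    | simp only [List.foldl, List.map, List.cons_append, List.nil_append]
    | skip
    norm_num
    rw [PySem.List.insert_ofNat _ 8 _ (by simp)]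
    first
    | simp only [List.take, List.drop, List.map, List.cons_append, List.nil_append]
    | skip
    rw [PySem.List.insert_ofNat _ 4 _ (by simp)]
    first
    | simp only [List.take, List.drop, List.map, List.cons_append, List.nil_append]
    | skip
    rw [PySem.List.insert_zero]
    first
    | simp only [List.take, List.drop, List.map, List.cons_append, List.nil_append]
    | skip
    rw [digitRound c0 (hdig c0 (by simp)),
        digitRound c1 (hdig c1 (by simp)),
        digitRound c2 (hdig c2 (by simp)),
        digitRound c3 (hdig c3 (by simp)),
        digitRound c4 (hdig c4 (by simp)),
        digitRound c5 (hdig c5 (by simp)),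
        digitRound c6 (hdig c6 (by simp)),
        digitRound c7 (hdig c7 (by simp))]
    simp [PySem.List.slice, PySem.List.clampIdx, PySem.Str.join, PySem.Chars.join,
          List.intercalate, List.intersperse]
  · -- length 9
    rw [hcs] at hdig
    simp only [number_to_japanese, number_to_japanese_alt, hcs]
    norm_num
    rw [show PySem.List.pyRange (0:Int) 3 = [0, 1, 2] from by decide,
        show PySem.List.pyRange (2:Int) 0 (-1) = [2, 1] from by decide]
    first
    | simp only [List.foldl, List.map, List.cons_append, List.nil_append]
    | skip
    norm_num
    rw [PySem.List.insert_ofNat _ 9 _ (by simp)]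
    first
    | simp only [List.take, List.drop, List.map, List.cons_append, List.nil_append]
    | skip
    rw [PySem.List.insert_ofNat _ 5 _ (by simp)]
    first
    | simp only [List.take, List.drop, List.map, List.cons_append, List.nil_append]
    | skip
    rw [PySem.List.insert_ofNat _ 1 _ (by simp)]
    first
    | simp only [List.take, List.drop, List.map, List.cons_append, List.nil_append]
    | skip
    rw [digitRound c0 (hdig c0 (by simp)),
        digitRound c1 (hdig c1 (by simp)),
        digitRound c2 (hdig c2 (by simp)),
        digitRound c3 (hdig c3 (by simp)),
        digitRound c4 (hdig c4 (by simp)),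
        digitRound c5 (hdig c5 (by simp)),
        digitRound c6 (hdig c6 (by simp)),
        digitRound c7 (hdig c7 (by simp)),
        digitRound c8 (hdig c8 (by simp))]
    simp [PySem.List.slice, PySem.List.clampIdx, PySem.Str.join, PySem.Chars.join,
          List.intercalate, List.intersperse]
  · -- length 10
    rw [hcs] at hdig
    simp only [number_to_japanese, number_to_japanese_alt, hcs]
    norm_num
    rw [show PySem.List.pyRange (0:Int) 3 = [0, 1, 2] from by decide,
        show PySem.List.pyRange (2:Int) 0 (-1) = [2, 1] from by decide]
    first
    | simp only [List.foldl, List.map, List.cons_append, List.nil_append]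
    | skip
    norm_num
    rw [PySem.List.insert_ofNat _ 10 _ (by simp)]
    first
    | simp only [List.take, List.drop, List.map, List.cons_append, List.nil_append]
    | skip
    rw [PySem.List.insert_ofNat _ 6 _ (by simp)]
    first
    | simp only [List.take, List.drop, List.map, List.cons_append, List.nil_append]
    | skip
    rw [PySem.List.insert_ofNat _ 2 _ (by simp)]
    first
    | simp only [List.take, List.drop, List.map, List.cons_append, List.nil_append]
    | skip
    rw [digitRound c0 (hdig c0 (by simp)),
        digitRound c1 (hdig c1 (by simp)),
        digitRound c2 (hdig c2 (by simp)),
        digitRound c3 (hdig c3 (by simp)),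
        digitRound c4 (hdig c4 (by simp)),
        digitRound c5 (hdig c5 (by simp)),
        digitRound c6 (hdig c6 (by simp)),
        digitRound c7 (hdig c7 (by simp)),
        digitRound c8 (hdig c8 (by simp)),
        digitRound c9 (hdig c9 (by simp))]
    simp [PySem.List.slice, PySem.List.clampIdx, PySem.Str.join, PySem.Chars.join,
          List.intercalate, List.intersperse]
  · rw [hcs] at hlen
    simp only [List.length] at hlen
    omega
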